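-- pv_equiv track=rewrite | github.com/AragonD19/Lab2Redes | Mario/main.py | decodificarMensaje
-- ===== SOURCE A (Python) =====
-- def hamming_distance(x, y):
--     #Calcula la distancia de Hamming entre dos listas de bits.
--     return sum(el1 != el2 for el1, el2 in zip(x, y))
--
-- def decodificarMensaje(mensajeCodificado, rate):
--     #Decodifica un mensaje codificado usando el algoritmo de Viterbi.
--     n = len(mensajeCodificado) // rate  # Número de bits en el mensaje original
--     trellis = [{} for _ in range(n + 1)]
--
--     # Inicializar el trellis con el estado inicial
--     trellis[0][(0, 0)] = (0, '')
--
--     for i in range(n):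
--         for state in trellis[i]:
--             for bit in [0, 1]:
--                 # Calcular el nuevo estado
--                 new_state = ((state[0] << 1) | bit) & 3
--                 # Calcular las salidas esperadas
--                 salida1 = (state[0] & 1) ^ bit
--                 salida2 = ((state[0] >> 1) & 1) ^ bit
--                 nueva_salida = [salida1, salida2]
--                 new_path = trellis[i][state][1] + str(bit)
--
--                 # Calcular la métrica de Hamming entre la salida esperada y la recibida
--                 metrica = trellis[i][state][0] + hamming_distance([mensajeCodificado[2*i], mensajeCodificado[2*i+1]], nueva_salida)
--
--                 # Actualizar el trellis si encontramos un camino con mejor métrica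
--                 if (new_state, state[1]) not in trellis[i + 1] or metrica < trellis[i + 1][(new_state, state[1])][0]:
--                     trellis[i + 1][(new_state, state[1])] = (metrica, new_path)
--
--     # Encontrar el mejor camino en el trellis
--     best_path = min(trellis[-1].values(), key=lambda x: x[0])[1]
--     return best_path
-- ===== SOURCE B (Python) =====
-- def decodificarMensaje(mensajeCodificado, rate):
--     # Viterbi with backpointers: keep per-step metric tables plus (prev, bit)
--     # backpointers and reconstruct the path once at the end, instead of
--     # concatenating a path string for every state at every step.
--     n = len(mensajeCodificado) // rate
--     cur = {0: 0}          # state -> best metric so far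
--     layers = []           # layers[i]: state -> (metric, prev_state, bit)
--     for i in range(n):
--         r0 = mensajeCodificado[2 * i]
--         r1 = mensajeCodificado[2 * i + 1]
--         nxt = {}
--         for s, met in cur.items():
--             for bit in (0, 1):
--                 ns = (2 * s + bit) % 4
--                 cost = (r0 != (s + bit) % 2) + (r1 != (s // 2 + bit) % 2)
--                 m2 = met + cost
--                 if ns not in nxt or m2 < nxt[ns][0]:
--                     nxt[ns] = (m2, s, bit)
--         layers.append(nxt)
--         cur = {s: t[0] for s, t in nxt.items()}
--     best = min(cur.items(), key=lambda kv: kv[1])[0]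
--     bits = []
--     st = best
--     for layer in reversed(layers):
--         _, p, b = layer[st]
--         bits.append(str(b))
--         st = p
--     return ''.join(reversed(bits))
-- ===== Notes on version B (the rewrite author's own statement) =====
-- stated objective: alternative
-- what changed: B runs Viterbi keeping only per-state metrics plus (prev_state, bit) backpointer layers and reconstructs the decoded bit string once by backtracking at the end, instead of A's scheme of concatenating a growing path string into every trellis cell at every step.
import Mathlib
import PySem

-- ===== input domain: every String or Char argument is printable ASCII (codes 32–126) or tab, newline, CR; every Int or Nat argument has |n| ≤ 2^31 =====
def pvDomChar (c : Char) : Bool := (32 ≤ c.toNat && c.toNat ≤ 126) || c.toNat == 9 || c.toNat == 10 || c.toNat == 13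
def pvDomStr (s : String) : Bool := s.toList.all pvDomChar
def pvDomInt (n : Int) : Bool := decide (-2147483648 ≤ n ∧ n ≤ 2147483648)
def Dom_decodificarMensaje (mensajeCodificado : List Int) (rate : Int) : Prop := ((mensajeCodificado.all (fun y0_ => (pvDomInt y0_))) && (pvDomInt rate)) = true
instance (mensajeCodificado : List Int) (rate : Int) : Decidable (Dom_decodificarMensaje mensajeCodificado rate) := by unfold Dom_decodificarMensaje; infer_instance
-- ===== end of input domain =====

-- B replaces A's per-cell path-string concatenation by backpointer layers plus one final
-- backtracking pass (objective: alternative algorithm, same values).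
-- Trellis path strings are modelled as List Char (the PySem string model); the return
-- value is the String built from them.

-- ===== PORT A =====
def hammingDistance (x y : List Int) : Int :=
  (x.zip y).foldl (fun a p => a + (if p.1 ≠ p.2 then (1 : Int) else 0)) 0

-- the body of A's innermost loop: one candidate transition, conditional dict update
def updA (r0 r1 : Int) (kv : (Int × Int) × (Int × List Char)) (bit : Int)
    (nd : PySem.Dict (Int × Int) (Int × List Char)) :
    PySem.Dict (Int × Int) (Int × List Char) :=
  let ns := PySem.Int.band (PySem.Int.bor (kv.1.1 <<< (1 : Int)) bit) 3
  let o1 := PySem.Int.bxor (PySem.Int.band kv.1.1 1) bit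
  let o2 := PySem.Int.bxor (PySem.Int.band (kv.1.1 >>> (1 : Int)) 1) bit
  let npath := kv.2.2 ++ PySem.Int.toChars bit
  let met2 := kv.2.1 + hammingDistance [r0, r1] [o1, o2]
  match nd.get? (ns, kv.1.2) with
  | none => nd.insert (ns, kv.1.2) (met2, npath)
  | some t => if met2 < t.1 then nd.insert (ns, kv.1.2) (met2, npath) else nd

-- one trellis step: builds trellis[i+1] from trellis[i] (A only ever reads the previous level)
def stepA (r0 r1 : Int) (d : PySem.Dict (Int × Int) (Int × List Char)) :
    PySem.Dict (Int × Int) (Int × List Char) :=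
  d.items.foldl (fun nd kv => ([0, 1] : List Int).foldl (fun nd bit => updA r0 r1 kv bit nd) nd)
    PySem.Dict.empty

def decodificarMensaje (mensajeCodificado : List Int) (rate : Int) : String :=
  if rate = 0 then ""   -- Python raises ZeroDivisionError here; excluded by Pre_
  else
    let n := PySem.Int.floordiv (mensajeCodificado.length : Int) rate
    let init : PySem.Dict (Int × Int) (Int × List Char) := PySem.Dict.empty.insert (0, 0) (0, [])
    -- the trellis list collapses to its last level: level i+1 is computed from level i only
    let fin := (PySem.List.pyRange 0 n 1).foldl
      (fun d i => stepA ((PySem.List.pyGet? mensajeCodificado (2 * i)).getD 0)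
                        ((PySem.List.pyGet? mensajeCodificado (2 * i + 1)).getD 0) d) init
    -- .getD 0: Python raises IndexError where pyGet? is none; excluded by Pre_.
    -- min over the values (Python raises on an empty dict — impossible here): default unreachable
    String.ofList (((PySem.List.min? fin.values (fun v => v.1)).getD (0, [])).2)

-- ===== PORT B =====
-- the body of B's innermost loop: one candidate transition, conditional dict update
def updB (r0 r1 : Int) (sm : Int × Int) (bit : Int) (nxt : PySem.Dict Int (Int × Int × Int)) :
    PySem.Dict Int (Int × Int × Int) :=
  let ns := PySem.Int.mod (2 * sm.1 + bit) 4
  let cost := (if r0 ≠ PySem.Int.mod (sm.1 + bit) 2 then (1 : Int) else 0)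
            + (if r1 ≠ PySem.Int.mod (PySem.Int.floordiv sm.1 2 + bit) 2 then (1 : Int) else 0)
  let m2 := sm.2 + cost
  match nxt.get? ns with
  | none => nxt.insert ns (m2, sm.1, bit)
  | some t => if m2 < t.1 then nxt.insert ns (m2, sm.1, bit) else nxt

def stepB (r0 r1 : Int) (cur : PySem.Dict Int Int) : PySem.Dict Int (Int × Int × Int) :=
  cur.items.foldl (fun nxt sm => ([0, 1] : List Int).foldl (fun nxt bit => updB r0 r1 sm bit nxt) nxt)
    PySem.Dict.empty

def decodificarMensaje_alt (mensajeCodificado : List Int) (rate : Int) : String :=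
  if rate = 0 then ""   -- outside Pre_
  else
    let n := PySem.Int.floordiv (mensajeCodificado.length : Int) rate
    let fin := (PySem.List.pyRange 0 n 1).foldl
      (fun (st : PySem.Dict Int Int × List (PySem.Dict Int (Int × Int × Int))) i =>
        let nxt := stepB ((PySem.List.pyGet? mensajeCodificado (2 * i)).getD 0)
                         ((PySem.List.pyGet? mensajeCodificado (2 * i + 1)).getD 0) st.1
        (PySem.Dict.mk (nxt.items.map (fun p => (p.1, p.2.1))), st.2 ++ [nxt]))
      (PySem.Dict.empty.insert 0 0, ([] : List (PySem.Dict Int (Int × Int × Int))))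
    let best := ((PySem.List.min? fin.1.items (fun kv => kv.2)).getD (0, 0)).1
    -- backtrack; layer[st] always hits under Pre_, so the getD default is unreachable
    let bt := fin.2.reverse.foldl
      (fun (acc : List (List Char) × Int) layer =>
        let t := layer.getD acc.2 (0, 0, 0)
        (acc.1 ++ [PySem.Int.toChars t.2.2], t.2.1)) ([], best)
    String.ofList (PySem.Chars.join [] bt.1.reverse)

-- ===== PRECONDITION & SPEC =====
-- Pre_ is exactly where Python A returns: rate ≠ 0 (else ZeroDivisionError), the decoded
-- length n = len // rate is ≥ 0 (else trellis[0] raises IndexError) and 2n ≤ len (else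
-- mensajeCodificado[2*i] or [2*i+1] raises IndexError).
def Pre_decodificarMensaje (mensajeCodificado : List Int) (rate : Int) : Prop :=
  rate ≠ 0 ∧ 0 ≤ PySem.Int.floordiv (mensajeCodificado.length : Int) rate ∧
    2 * PySem.Int.floordiv (mensajeCodificado.length : Int) rate ≤ (mensajeCodificado.length : Int)
instance (mensajeCodificado : List Int) (rate : Int) : Decidable (Pre_decodificarMensaje mensajeCodificado rate) := by unfold Pre_decodificarMensaje; infer_instance

def pvWitness_decodificarMensaje : List Int × Int := ([0, 1, 1, 0], 2)

def Spec_decodificarMensaje (mensajeCodificado : List Int) (rate : Int) (out : String) : Prop := out = decodificarMensaje_alt mensajeCodificado rate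
instance (mensajeCodificado : List Int) (rate : Int) (out : String) : Decidable (Spec_decodificarMensaje mensajeCodificado rate out) := by unfold Spec_decodificarMensaje; infer_instance

-- ===== CLAIM (what is proved, stated in full; the proofs are below) =====
def Claim_equal_decodificarMensaje : Prop := ∀ (mensajeCodificado : List Int) (rate : Int), Dom_decodificarMensaje mensajeCodificado rate → Pre_decodificarMensaje mensajeCodificado rate → Spec_decodificarMensaje mensajeCodificado rate (decodificarMensaje mensajeCodificado rate)

-- ===== LEMMAS AND PROOFS =====

abbrev PVLayer := PySem.Dict Int (Int × Int × Int)
abbrev PVADict := PySem.Dict (Int × Int) (Int × List Char)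

-- the path B's backtracking reconstructs, on the REVERSED layer list
def PVPath : List PVLayer → Int → List Char
  | [], _ => []
  | L :: rest, s =>
    let t := L.getD s (0, 0, 0)
    PVPath rest t.2.1 ++ PySem.Int.toChars t.2.2

-- the bit chunks B's backtracking loop collects, in loop (= backwards) order
def PVBt : List PVLayer → Int → List (List Char)
  | [], _ => []
  | L :: rest, s =>
    let t := L.getD s (0, 0, 0)
    PySem.Int.toChars t.2.2 :: PVBt rest t.2.1

-- the translation between a B layer entry and an A trellis entry (φ = previous-level paths)
def PVG (φ : Int → List Char) (p : Int × (Int × Int × Int)) : (Int × Int) × (Int × List Char) :=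
  ((p.1, 0), (p.2.1, φ p.2.2.1 ++ PySem.Int.toChars p.2.2.2))
theorem pv_ham (a b c d : Int) :
    hammingDistance [a, b] [c, d] = (if a ≠ c then (1 : Int) else 0) + (if b ≠ d then (1 : Int) else 0) := by
  simp only [hammingDistance, List.zip, List.zipWith, List.foldl]
  split_ifs <;> ring

theorem pv_ops (s bit : Int) (h0 : 0 ≤ s) (h4 : s < 4) (hb : bit = 0 ∨ bit = 1) :
    PySem.Int.band (PySem.Int.bor (s <<< (1 : Int)) bit) 3 = PySem.Int.mod (2 * s + bit) 4
  ∧ PySem.Int.bxor (PySem.Int.band s 1) bit = PySem.Int.mod (s + bit) 2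
  ∧ PySem.Int.bxor (PySem.Int.band (s >>> (1 : Int)) 1) bit = PySem.Int.mod (PySem.Int.floordiv s 2 + bit) 2 := by
  rcases hb with rfl | rfl <;> interval_cases s <;> exact ⟨by decide, by decide, by decide⟩
theorem pv_get?_rel (φ : Int → List Char) (lb : List (Int × (Int × Int × Int))) (k : Int) :
    (PySem.Dict.mk (lb.map (PVG φ))).get? (k, 0)
      = Option.map (fun t => (t.1, φ t.2.1 ++ PySem.Int.toChars t.2.2))
        ((PySem.Dict.mk lb).get? k) := by
  simp only [PySem.Dict.get?]
  induction lb with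
  | nil => rfl
  | cons p tl ih =>
    simp only [List.map_cons]
    by_cases hp : p.1 = k
    · rw [List.find?_cons_of_pos (h := by simp [PVG, hp]), List.find?_cons_of_pos (h := by simp [hp])]
      simp [PVG]
    · rw [List.find?_cons_of_neg (h := by simp [PVG, hp]), List.find?_cons_of_neg (h := by simp [hp])]
      exact ih

theorem pv_contains_rel (φ : Int → List Char) (lb : List (Int × (Int × Int × Int))) (k : Int) :
    (PySem.Dict.mk (lb.map (PVG φ))).contains (k, 0) = (PySem.Dict.mk lb).contains k := by
  rw [PySem.Dict.contains_eq_isSome_get?, PySem.Dict.contains_eq_isSome_get?, pv_get?_rel]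
  cases (PySem.Dict.mk lb).get? k <;> rfl

theorem pv_insert_rel (φ : Int → List Char) (lb : List (Int × (Int × Int × Int)))
    (k : Int) (v : Int × Int × Int) :
    ((PySem.Dict.mk (lb.map (PVG φ))).insert (k, 0) (v.1, φ v.2.1 ++ PySem.Int.toChars v.2.2)).items
      = ((PySem.Dict.mk lb).insert k v).items.map (PVG φ) := by
  unfold PySem.Dict.insert
  rw [pv_contains_rel]
  by_cases hc : (PySem.Dict.mk lb).contains k = true
  · simp only [hc, if_true]
    show (lb.map (PVG φ)).map _ = (lb.map _).map (PVG φ)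
    rw [List.map_map, List.map_map]
    apply List.map_congr_left
    intro p _
    by_cases hp : p.1 = k
    · simp [PVG, hp]
    · simp [PVG, hp]
  · simp only [hc]
    show (lb.map (PVG φ)) ++ [((k, 0), (v.1, φ v.2.1 ++ PySem.Int.toChars v.2.2))] = (lb ++ [(k, v)]).map (PVG φ)
    simp [PVG]

theorem pv_bit_rel (r0 r1 : Int) (φ : Int → List Char) (sm : Int × Int) (bit : Int)
    (h0 : 0 ≤ sm.1) (h4 : sm.1 < 4) (hb : bit = 0 ∨ bit = 1) (nx : PVLayer) :
    (updA r0 r1 ((sm.1, 0), (sm.2, φ sm.1)) bit (PySem.Dict.mk (nx.items.map (PVG φ)))).items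
      = (updB r0 r1 sm bit nx).items.map (PVG φ) := by
  obtain ⟨s, met⟩ := sm
  dsimp only at *
  obtain ⟨e1, e2, e3⟩ := pv_ops s bit h0 h4 hb
  unfold updA updB
  dsimp only
  rw [e1, e2, e3, pv_ham]
  have hnx : nx = PySem.Dict.mk nx.items := rfl
  rw [pv_get?_rel φ nx.items]
  cases hg : (PySem.Dict.mk nx.items).get? (PySem.Int.mod (2 * s + bit) 4) with
  | none =>
    simp only [Option.map_none]
    exact pv_insert_rel φ nx.items (PySem.Int.mod (2 * s + bit) 4) (met + ((if r0 ≠ PySem.Int.mod (s + bit) 2 then (1:Int) else 0) + (if r1 ≠ PySem.Int.mod (PySem.Int.floordiv s 2 + bit) 2 then (1:Int) else 0)), s, bit)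
  | some t =>
    simp only [Option.map_some]
    by_cases hlt : met + ((if r0 ≠ PySem.Int.mod (s + bit) 2 then (1:Int) else 0) + (if r1 ≠ PySem.Int.mod (PySem.Int.floordiv s 2 + bit) 2 then (1:Int) else 0)) < t.1
    · simp only [hlt, if_true]
      exact pv_insert_rel φ nx.items (PySem.Int.mod (2 * s + bit) 4) (met + ((if r0 ≠ PySem.Int.mod (s + bit) 2 then (1:Int) else 0) + (if r1 ≠ PySem.Int.mod (PySem.Int.floordiv s 2 + bit) 2 then (1:Int) else 0)), s, bit)
    · simp only [hlt, if_false]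

theorem pv_step_rel (r0 r1 : Int) (φ : Int → List Char)
    (dA : PVADict) (cur : PySem.Dict Int Int)
    (h : dA.items = cur.items.map (fun sm => ((sm.1, (0 : Int)), (sm.2, φ sm.1))))
    (hb : ∀ sm ∈ cur.items, 0 ≤ sm.1 ∧ sm.1 < 4) :
    (stepA r0 r1 dA).items = (stepB r0 r1 cur).items.map (PVG φ) := by
  unfold stepA stepB
  rw [h, List.foldl_map]
  have main : ∀ (l : List (Int × Int)), (∀ sm ∈ l, 0 ≤ sm.1 ∧ sm.1 < 4) →
      ∀ (nx : PVLayer),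
      (List.foldl (fun nd sm => List.foldl (fun nd bit => updA r0 r1 ((sm.1, (0 : Int)), (sm.2, φ sm.1)) bit nd) nd ([0, 1] : List Int)) (PySem.Dict.mk (nx.items.map (PVG φ))) l).items
        = (List.foldl (fun nxt sm => List.foldl (fun nxt bit => updB r0 r1 sm bit nxt) nxt ([0, 1] : List Int)) nx l).items.map (PVG φ) := by
    intro l
    induction l with
    | nil => intro _ nx; rfl
    | cons sm tl ih =>
      intro hbl nx
      have hsm := hbl sm (List.mem_cons_self ..)
      have htl := fun x hx => hbl x (List.mem_cons_of_mem _ hx)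
      simp only [List.foldl_cons, List.foldl_nil]
      have e0 : updA r0 r1 ((sm.1, (0 : Int)), (sm.2, φ sm.1)) 0 (PySem.Dict.mk (nx.items.map (PVG φ)))
          = PySem.Dict.mk ((updB r0 r1 sm 0 nx).items.map (PVG φ)) :=
        PySem.Dict.ext (pv_bit_rel r0 r1 φ sm 0 hsm.1 hsm.2 (Or.inl rfl) nx)
      rw [e0]
      have e1 : updA r0 r1 ((sm.1, (0 : Int)), (sm.2, φ sm.1)) 1 (PySem.Dict.mk ((updB r0 r1 sm 0 nx).items.map (PVG φ)))
          = PySem.Dict.mk ((updB r0 r1 sm 1 (updB r0 r1 sm 0 nx)).items.map (PVG φ)) :=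
        PySem.Dict.ext (pv_bit_rel r0 r1 φ sm 1 hsm.1 hsm.2 (Or.inr rfl) (updB r0 r1 sm 0 nx))
      rw [e1]
      exact ih htl (updB r0 r1 sm 1 (updB r0 r1 sm 0 nx))
  exact main cur.items hb PySem.Dict.empty

theorem pv_updB_inv (r0 r1 : Int) (sm : Int × Int) (bit : Int) (d : PySem.Dict Int (Int × Int × Int))
    (h1 : ∀ p ∈ d.items, 0 ≤ p.1 ∧ p.1 < 4) (h2 : d.keys.Nodup) :
    (∀ p ∈ (updB r0 r1 sm bit d).items, 0 ≤ p.1 ∧ p.1 < 4) ∧ (updB r0 r1 sm bit d).keys.Nodup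
      ∧ d.items.length ≤ (updB r0 r1 sm bit d).items.length := by
  have hns : 0 ≤ PySem.Int.mod (2 * sm.1 + bit) 4 ∧ PySem.Int.mod (2 * sm.1 + bit) 4 < 4 :=
    ⟨PySem.Int.mod_nonneg _ (by norm_num), PySem.Int.mod_lt _ (by norm_num)⟩
  have hins : ∀ (v : Int × Int × Int),
      (∀ p ∈ (d.insert (PySem.Int.mod (2 * sm.1 + bit) 4) v).items, 0 ≤ p.1 ∧ p.1 < 4)
      ∧ (d.insert (PySem.Int.mod (2 * sm.1 + bit) 4) v).keys.Nodup
      ∧ d.items.length ≤ (d.insert (PySem.Int.mod (2 * sm.1 + bit) 4) v).items.length := by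
    intro v
    refine ⟨?_, PySem.Dict.nodup_keys_insert _ _ _ h2, ?_⟩
    · intro p hp
      rcases (PySem.Dict.mem_items_insert _ _ _ _).1 hp with hpe | hpm
      · rw [hpe]; exact hns
      · exact h1 p hpm.1
    · have := PySem.Dict.size_insert d (PySem.Int.mod (2 * sm.1 + bit) 4) v
      simp only [PySem.Dict.size] at this
      rw [this]
      split <;> omega
  unfold updB
  dsimp only
  cases hg : d.get? (PySem.Int.mod (2 * sm.1 + bit) 4) with
  | none => exact hins _
  | some t =>
    by_cases hlt : sm.2 + ((if r0 ≠ PySem.Int.mod (sm.1 + bit) 2 then (1 : Int) else 0) + (if r1 ≠ PySem.Int.mod (PySem.Int.floordiv sm.1 2 + bit) 2 then (1 : Int) else 0)) < t.1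
    · simp only [hlt, if_true]
      exact hins _
    · simp only [hlt, if_false]
      exact ⟨h1, h2, le_refl _⟩

theorem pv_stepB_inv (r0 r1 : Int) (cur : PySem.Dict Int Int) :
    (∀ p ∈ (stepB r0 r1 cur).items, 0 ≤ p.1 ∧ p.1 < 4)
  ∧ (stepB r0 r1 cur).keys.Nodup
  ∧ (cur.items ≠ [] → (stepB r0 r1 cur).items ≠ []) := by
  have body : ∀ (sm : Int × Int) (d : PySem.Dict Int (Int × Int × Int)),
      (∀ p ∈ d.items, 0 ≤ p.1 ∧ p.1 < 4) → d.keys.Nodup →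
      (∀ p ∈ (List.foldl (fun nxt bit => updB r0 r1 sm bit nxt) d ([0, 1] : List Int)).items, 0 ≤ p.1 ∧ p.1 < 4)
      ∧ (List.foldl (fun nxt bit => updB r0 r1 sm bit nxt) d ([0, 1] : List Int)).keys.Nodup
      ∧ d.items.length ≤ (List.foldl (fun nxt bit => updB r0 r1 sm bit nxt) d ([0, 1] : List Int)).items.length := by
    intro sm d hd1 hd2
    simp only [List.foldl_cons, List.foldl_nil]
    obtain ⟨a1, a2, a3⟩ := pv_updB_inv r0 r1 sm 0 d hd1 hd2
    obtain ⟨b1, b2, b3⟩ := pv_updB_inv r0 r1 sm 1 (updB r0 r1 sm 0 d) a1 a2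
    exact ⟨b1, b2, le_trans a3 b3⟩
  have main : ∀ (l : List (Int × Int)) (d : PySem.Dict Int (Int × Int × Int)),
      (∀ p ∈ d.items, 0 ≤ p.1 ∧ p.1 < 4) → d.keys.Nodup →
      (∀ p ∈ (List.foldl (fun nxt sm => List.foldl (fun nxt bit => updB r0 r1 sm bit nxt) nxt ([0, 1] : List Int)) d l).items, 0 ≤ p.1 ∧ p.1 < 4)
      ∧ (List.foldl (fun nxt sm => List.foldl (fun nxt bit => updB r0 r1 sm bit nxt) nxt ([0, 1] : List Int)) d l).keys.Nodup
      ∧ d.items.length ≤ (List.foldl (fun nxt sm => List.foldl (fun nxt bit => updB r0 r1 sm bit nxt) nxt ([0, 1] : List Int)) d l).items.length := by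
    intro l
    induction l with
    | nil => intro d hd1 hd2; exact ⟨hd1, hd2, le_refl _⟩
    | cons sm tl ih =>
      intro d hd1 hd2
      simp only [List.foldl_cons]
      obtain ⟨a1, a2, a3⟩ := body sm d hd1 hd2
      obtain ⟨c1, c2, c3⟩ := ih _ a1 a2
      exact ⟨c1, c2, le_trans a3 c3⟩
  unfold stepB
  refine ⟨?_, ?_, ?_⟩
  · exact (main cur.items PySem.Dict.empty (by intro p hp; cases hp) (by simp [PySem.Dict.keys, PySem.Dict.empty])).1
  · exact (main cur.items PySem.Dict.empty (by intro p hp; cases hp) (by simp [PySem.Dict.keys, PySem.Dict.empty])).2.1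
  · intro hne
    cases hcur : cur.items with
    | nil => exact absurd hcur hne
    | cons c t =>
      have h1 : 1 ≤ (updB r0 r1 c 0 PySem.Dict.empty).items.length := by
        unfold updB
        dsimp only
        simp only [PySem.Dict.get?_empty]
        simp [PySem.Dict.insert, PySem.Dict.contains, PySem.Dict.empty]
      have e0 : ∀ p ∈ (PySem.Dict.empty : PySem.Dict Int (Int × Int × Int)).items, 0 ≤ p.1 ∧ p.1 < 4 := by intro p hp; cases hp
      have e2 : (PySem.Dict.empty : PySem.Dict Int (Int × Int × Int)).keys.Nodup := by simp [PySem.Dict.keys, PySem.Dict.empty]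
      obtain ⟨a1, a2, _⟩ := pv_updB_inv r0 r1 c 0 PySem.Dict.empty e0 e2
      obtain ⟨b1, b2, b3⟩ := pv_updB_inv r0 r1 c 1 (updB r0 r1 c 0 PySem.Dict.empty) a1 a2
      obtain ⟨_, _, c3⟩ := main t (List.foldl (fun nxt bit => updB r0 r1 c bit nxt) PySem.Dict.empty ([0, 1] : List Int)) (by
          simpa only [List.foldl_cons, List.foldl_nil] using b1) (by
          simpa only [List.foldl_cons, List.foldl_nil] using b2)
      simp only [List.foldl_cons]
      have hge : 1 ≤ (List.foldl (fun nxt bit => updB r0 r1 c bit nxt) PySem.Dict.empty ([0, 1] : List Int)).items.length := by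
        simpa only [List.foldl_cons, List.foldl_nil] using le_trans h1 b3
      have hpos : 0 < (List.foldl (fun nxt sm => List.foldl (fun nxt bit => updB r0 r1 sm bit nxt) nxt ([0, 1] : List Int)) (List.foldl (fun nxt bit => updB r0 r1 c bit nxt) PySem.Dict.empty ([0, 1] : List Int)) t).items.length := by
        omega
      exact List.ne_nil_of_length_pos hpos

theorem pv_bt_fold (revl : List PVLayer) : ∀ (s : Int) (acc : List (List Char)),
    (revl.foldl (fun (acc : List (List Char) × Int) layer =>
      (acc.1 ++ [PySem.Int.toChars (layer.getD acc.2 (0, 0, 0)).2.2], (layer.getD acc.2 (0, 0, 0)).2.1)) (acc, s)).1 = acc ++ PVBt revl s := by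
  induction revl with
  | nil => intro s acc; simp [PVBt]
  | cons L rest ih =>
    intro s acc
    simp only [List.foldl_cons]
    rw [ih]
    simp [PVBt]

theorem pv_join_nil (ll : List (List Char)) : PySem.Chars.join [] ll = ll.flatten := by
  induction ll with
  | nil => rfl
  | cons a t ih =>
    cases t with
    | nil => simp [PySem.Chars.join, List.intercalate]
    | cons b t2 =>
      rw [PySem.Chars.join_cons_cons, ih]
      simp

theorem pv_bt_path (revl : List PVLayer) : ∀ (s : Int),
    ((PVBt revl s).reverse).flatten = PVPath revl s := by
  induction revl with
  | nil => intro s; rfl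
  | cons L rest ih =>
    intro s
    simp only [PVBt, PVPath, List.reverse_cons, List.flatten_append]
    rw [ih]
    simp

theorem pv_one_level (r0 r1 : Int) (dA : PVADict) (cur : PySem.Dict Int Int) (layers : List PVLayer)
    (h : dA.items = cur.items.map (fun sm => ((sm.1, (0 : Int)), (sm.2, PVPath layers.reverse sm.1))))
    (hb : ∀ sm ∈ cur.items, 0 ≤ sm.1 ∧ sm.1 < 4) (hne : cur.items ≠ []) :
    ((stepA r0 r1 dA).items
        = (PySem.Dict.mk ((stepB r0 r1 cur).items.map (fun p => (p.1, p.2.1)))).items.map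
          (fun sm => ((sm.1, (0 : Int)), (sm.2, PVPath (layers ++ [stepB r0 r1 cur]).reverse sm.1))))
    ∧ (∀ sm ∈ (PySem.Dict.mk ((stepB r0 r1 cur).items.map (fun p => (p.1, p.2.1)))).items, 0 ≤ sm.1 ∧ sm.1 < 4)
    ∧ (PySem.Dict.mk ((stepB r0 r1 cur).items.map (fun p => (p.1, p.2.1)))).items ≠ [] := by
  obtain ⟨q1, q2, q3⟩ := pv_stepB_inv r0 r1 cur
  have hrel := pv_step_rel r0 r1 (PVPath layers.reverse) dA cur h hb
  refine ⟨?_, ?_, ?_⟩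
  · rw [hrel]
    show _ = ((stepB r0 r1 cur).items.map (fun p => (p.1, p.2.1))).map _
    rw [List.map_map]
    apply List.map_congr_left
    intro p hp
    have hget : (stepB r0 r1 cur).getD p.1 (0, 0, 0) = p.2 :=
      PySem.Dict.getD_of_mem_items _ (by exact hp) q2 _
    simp only [PVG, List.reverse_append, List.reverse_cons, List.reverse_nil, List.nil_append,
      List.singleton_append, PVPath, Function.comp]
    simp [hget]
  · intro sm hsm
    show (0 : Int) ≤ sm.1 ∧ sm.1 < 4
    obtain ⟨p, hpm, hpe⟩ := List.mem_map.1 hsm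
    have := q1 p hpm
    rw [← hpe]
    exact this
  · intro hcontra
    exact q3 hne (by simpa using hcontra)

theorem pv_levels (m : List Int) (idx : List Int) :
    ∀ (dA : PVADict) (cur : PySem.Dict Int Int) (layers : List PVLayer),
    dA.items = cur.items.map (fun sm => ((sm.1, (0 : Int)), (sm.2, PVPath layers.reverse sm.1))) →
    (∀ sm ∈ cur.items, 0 ≤ sm.1 ∧ sm.1 < 4) → cur.items ≠ [] →
    ((idx.foldl (fun d i => stepA ((PySem.List.pyGet? m (2 * i)).getD 0) ((PySem.List.pyGet? m (2 * i + 1)).getD 0) d) dA).items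
        = (idx.foldl (fun (st : PySem.Dict Int Int × List PVLayer) i =>
            let nxt := stepB ((PySem.List.pyGet? m (2 * i)).getD 0) ((PySem.List.pyGet? m (2 * i + 1)).getD 0) st.1
            (PySem.Dict.mk (nxt.items.map (fun p => (p.1, p.2.1))), st.2 ++ [nxt])) (cur, layers)).1.items.map
          (fun sm => ((sm.1, (0 : Int)), (sm.2, PVPath (idx.foldl (fun (st : PySem.Dict Int Int × List PVLayer) i =>
            let nxt := stepB ((PySem.List.pyGet? m (2 * i)).getD 0) ((PySem.List.pyGet? m (2 * i + 1)).getD 0) st.1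
            (PySem.Dict.mk (nxt.items.map (fun p => (p.1, p.2.1))), st.2 ++ [nxt])) (cur, layers)).2.reverse sm.1))))
    ∧ (∀ sm ∈ (idx.foldl (fun (st : PySem.Dict Int Int × List PVLayer) i =>
            let nxt := stepB ((PySem.List.pyGet? m (2 * i)).getD 0) ((PySem.List.pyGet? m (2 * i + 1)).getD 0) st.1
            (PySem.Dict.mk (nxt.items.map (fun p => (p.1, p.2.1))), st.2 ++ [nxt])) (cur, layers)).1.items, 0 ≤ sm.1 ∧ sm.1 < 4)
    ∧ (idx.foldl (fun (st : PySem.Dict Int Int × List PVLayer) i =>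
            let nxt := stepB ((PySem.List.pyGet? m (2 * i)).getD 0) ((PySem.List.pyGet? m (2 * i + 1)).getD 0) st.1
            (PySem.Dict.mk (nxt.items.map (fun p => (p.1, p.2.1))), st.2 ++ [nxt])) (cur, layers)).1.items ≠ [] := by
  induction idx with
  | nil => intro dA cur layers h hb hne; exact ⟨h, hb, hne⟩
  | cons i rest ih =>
    intro dA cur layers h hb hne
    simp only [List.foldl_cons]
    obtain ⟨o1, o2, o3⟩ := pv_one_level ((PySem.List.pyGet? m (2 * i)).getD 0) ((PySem.List.pyGet? m (2 * i + 1)).getD 0) dA cur layers h hb hne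
    exact ih _ _ _ o1 o2 o3

theorem pv_min?_map {α β κ : Type} [LT κ] [DecidableLT κ] (f : α → β) (k : β → κ) (l : List α) :
    PySem.List.min? (l.map f) k = Option.map f (PySem.List.min? l (fun x => k (f x))) := by
  unfold PySem.List.min?
  rw [List.foldl_map]
  have key : ∀ (acc : Option α),
      List.foldl (fun acc x => match acc with
        | none => some (f x)
        | some m => if k (f x) < k m then some (f x) else some m) (Option.map f acc) l
      = Option.map f (List.foldl (fun acc x => match acc with
        | none => some x
        | some m => if k (f x) < k (f m) then some x else some m) acc l) := by
    induction l with
    | nil => intro acc; rfl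
    | cons x t ih =>
      intro acc
      simp only [List.foldl_cons]
      cases acc with
      | none => exact ih (some x)
      | some m =>
        simp only [Option.map_some]
        by_cases hlt : k (f x) < k (f m)
        · simpa [hlt] using ih (some x)
        · simpa [hlt] using ih (some m)
  simpa using key none

theorem pv_Afinal (items : List (Int × Int)) (rev : List PVLayer) (hne : items ≠ []) :
    ∃ w, PySem.List.min? items (fun kv : Int × Int => kv.2) = some w ∧
      (PySem.List.min? (items.map (fun sm => (sm.2, PVPath rev sm.1))) (fun v => v.1)).getD (0, [])
        = (w.2, PVPath rev w.1) := by
  obtain ⟨w, hw⟩ : ∃ w, PySem.List.min? items (fun kv : Int × Int => kv.2) = some w := by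
    cases hmm : PySem.List.min? items (fun kv : Int × Int => kv.2) with
    | none => exact absurd ((PySem.List.min?_eq_none_iff _ _).1 hmm) hne
    | some w => exact ⟨w, rfl⟩
  refine ⟨w, hw, ?_⟩
  rw [pv_min?_map]
  have h2 : PySem.List.min? items (fun x : Int × Int => ((fun sm : Int × Int => (sm.2, PVPath rev sm.1)) x).1) = some w := hw
  rw [h2]
  rfl

theorem pv_equal (m : List Int) (rate : Int) : decodificarMensaje m rate = decodificarMensaje_alt m rate := by
  unfold decodificarMensaje decodificarMensaje_alt
  by_cases hr : rate = 0
  · simp [hr]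
  · rw [if_neg hr, if_neg hr]
    dsimp only
    set FA := List.foldl
        (fun d i => stepA ((PySem.List.pyGet? m (2 * i)).getD 0) ((PySem.List.pyGet? m (2 * i + 1)).getD 0) d)
        (PySem.Dict.empty.insert (0, 0) (0, []))
        (PySem.List.pyRange 0 (PySem.Int.floordiv (↑m.length) rate)) with hFA
    set FB := List.foldl
        (fun (st : PySem.Dict Int Int × List PVLayer) i =>
          (PySem.Dict.mk (List.map (fun p => (p.1, p.2.1))
              (stepB ((PySem.List.pyGet? m (2 * i)).getD 0) ((PySem.List.pyGet? m (2 * i + 1)).getD 0) st.1).items),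
            st.2 ++ [stepB ((PySem.List.pyGet? m (2 * i)).getD 0) ((PySem.List.pyGet? m (2 * i + 1)).getD 0) st.1]))
        (PySem.Dict.empty.insert 0 0, ([] : List PVLayer))
        (PySem.List.pyRange 0 (PySem.Int.floordiv (↑m.length) rate)) with hFB
    have hb0 : ∀ sm ∈ (PySem.Dict.empty.insert (0 : Int) (0 : Int)).items, (0 : Int) ≤ sm.1 ∧ sm.1 < 4 := by
      intro sm hsm
      have he : (PySem.Dict.empty.insert (0 : Int) (0 : Int)).items = [((0 : Int), (0 : Int))] := rfl
      rw [he] at hsm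
      simp at hsm
      rw [hsm]
      norm_num
    have hne0 : (PySem.Dict.empty.insert (0 : Int) (0 : Int)).items ≠ [] := by
      have he : (PySem.Dict.empty.insert (0 : Int) (0 : Int)).items = [((0 : Int), (0 : Int))] := rfl
      rw [he]
      simp
    obtain ⟨I1, I2, I3⟩ := pv_levels m (PySem.List.pyRange 0 (PySem.Int.floordiv (↑m.length) rate) 1)
        (PySem.Dict.empty.insert (0, 0) (0, [])) (PySem.Dict.empty.insert 0 0) [] rfl hb0 hne0
    rw [← hFA] at I1
    rw [← hFB] at I1 I2 I3
    have hval : FA.values = FB.1.items.map (fun sm => (sm.2, PVPath FB.2.reverse sm.1)) := by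
      show FA.items.map (fun p => p.2) = _
      rw [I1, List.map_map]
      rfl
    rw [hval]
    obtain ⟨w, hw, hA⟩ := pv_Afinal FB.1.items FB.2.reverse I3
    rw [hA, hw]
    dsimp only [Option.getD]
    rw [pv_bt_fold FB.2.reverse w.1 []]
    rw [List.nil_append, pv_join_nil, pv_bt_path]

-- ===== VERDICT (by name: the statement is the Claim_ definition above) =====
theorem decodificarMensaje_spec : Claim_equal_decodificarMensaje := by
  intro mensajeCodificado rate _ _
  unfold Spec_decodificarMensaje
  exact pv_equal mensajeCodificado rate
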